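-- pv_equiv track=rewrite | github.com/202030481266/CP-Templates-and-Solutions | 困难清除计划/2100~2200/最小代价构造字符串.py | min_cost_to_form_string
-- ===== SOURCE A (Python) =====
-- class TrieNode:
--     def __init__(self):
--         self.children = {}
--         self.cost = float('inf')
--
-- def insert_word(root, word, cost):
--     node = root
--     for char in word:
--         if char not in node.children:
--             node.children[char] = TrieNode()
--         node = node.children[char]
--     node.cost = min(node.cost, cost)
--
-- def min_cost_to_form_string(target, words, costs):
--     root = TrieNode()
--     for word, cost in zip(words, costs):
--         insert_word(root, word, cost)
--
--     n = len(target)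
--     dp = [float('inf')] * (n + 1)
--     dp[0] = 0
--
--     for i in range(n):
--         if dp[i] != float('inf'):
--             node = root
--             for j in range(i, n):
--                 if target[j] not in node.children:
--                     break
--                 node = node.children[target[j]]
--                 if node.cost != float('inf'):
--                     dp[j + 1] = min(dp[j + 1], dp[i] + node.cost)
--
--     return dp[n] if dp[n] != float('inf') else -1
-- ===== SOURCE B (Python) =====
-- def min_cost_to_form_string(target, words, costs):
--     # Group words by length into hash buckets (cheapest cost per word),
--     # then run the same dp by per-length substring lookups.
--     by_len = {}
--     for w, c in zip(words, costs):
--         if not w: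
--             continue  # an empty word can never extend the built string
--         bucket = by_len.setdefault(len(w), {})
--         if w not in bucket or c < bucket[w]:
--             bucket[w] = c
--     lengths = sorted(by_len)
--     n = len(target)
--     dp = [None] * (n + 1)
--     dp[0] = 0
--     for i in range(n):
--         if dp[i] is None:
--             continue
--         for L in lengths:
--             if i + L > n:
--                 break
--             c = by_len[L].get(target[i:i + L])
--             if c is not None and (dp[i + L] is None or dp[i] + c < dp[i + L]):
--                 dp[i + L] = dp[i] + c
--     return dp[n] if dp[n] is not None else -1
-- ===== Notes on version B (the rewrite author's own statement) =====
-- stated objective: faster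
-- what changed: Replaces the character trie and per-position char-by-char descent with a hash map grouping words by length (cheapest cost per duplicate word) and a dp that relaxes via one substring lookup per distinct word length.
import Mathlib
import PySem

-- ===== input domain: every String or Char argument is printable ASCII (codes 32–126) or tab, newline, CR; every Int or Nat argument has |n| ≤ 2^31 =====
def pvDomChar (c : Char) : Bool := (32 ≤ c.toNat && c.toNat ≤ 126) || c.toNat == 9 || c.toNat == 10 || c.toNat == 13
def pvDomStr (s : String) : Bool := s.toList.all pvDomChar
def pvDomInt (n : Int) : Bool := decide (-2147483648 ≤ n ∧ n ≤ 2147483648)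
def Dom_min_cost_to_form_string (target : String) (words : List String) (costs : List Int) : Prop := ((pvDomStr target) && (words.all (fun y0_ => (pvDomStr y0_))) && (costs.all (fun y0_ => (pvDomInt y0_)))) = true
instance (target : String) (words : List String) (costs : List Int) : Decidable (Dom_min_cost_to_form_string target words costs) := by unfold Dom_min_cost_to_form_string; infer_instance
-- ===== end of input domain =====

-- B replaces A's character trie and char-by-char dp descent by a hash map grouping
-- words by length (cheapest cost per duplicate) and per-length substring lookups
-- in the same dp; measurably faster (fewer, hashed lookups instead of per-char node hops).

-- ===== PORT A =====
-- Python's TrieNode (children : dict, cost : float('inf') or int).  A dict of child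
-- nodes inside its own node type is a nested inductive, which the kernel refuses, so
-- the children dict (an insertion-ordered assoc list) is encoded as the mutual list
-- type PvChildren; lookup/overwrite-in-place/append below match dict semantics exactly.
mutual
inductive PvTrie : Type where
  | node : PvChildren → Option Int → PvTrie   -- cost none = float('inf')
inductive PvChildren : Type where
  | nil : PvChildren
  | cons : Char → PvTrie → PvChildren → PvChildren
end

def pvChildren : PvTrie → PvChildren
  | .node ch _ => ch

def pvCost : PvTrie → Option Int
  | .node _ co => co

-- children.get(char): first (unique) matching key
def pvGetChild : PvChildren → Char → Option PvTrie
  | .nil, _ => none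
  | .cons b t rest, a => if b = a then some t else pvGetChild rest a

-- children[char] = t: overwrite in place, else append (dict assignment)
def pvSetChild : PvChildren → Char → PvTrie → PvChildren
  | .nil, a, t => .cons a t .nil
  | .cons b u rest, a, t => if b = a then .cons b t rest else .cons b u (pvSetChild rest a t)

-- min(node.cost, cost) with cost an int and node.cost possibly inf
def pvOmin (o : Option Int) (v : Int) : Option Int :=
  some (match o with | none => v | some x => min x v)

-- insert_word(root, word, cost), returning the updated trie
def pvInsertWord : PvTrie → List Char → Int → PvTrie
  | .node ch co, [], cost => .node ch (pvOmin co cost)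
  | .node ch co, a :: rest, cost =>
      let child := match pvGetChild ch a with
        | some t => t
        | none => .node .nil none          -- `node.children[char] = TrieNode()`
      .node (pvSetChild ch a (pvInsertWord child rest cost)) co

-- inner `for j in range(i, n)` loop: descend the trie, break on a missing child.
-- dp[i] is passed as di: the loop writes only indices j+1 > i, so dp[i] is the
-- value read by the guard in the outer loop.
def pvInnerA (ts : List Char) (n i : Nat) (di : Int)
    (j : Nat) (t : PvTrie) (dp : List (Option Int)) : List (Option Int) :=
    if _h : j < n then
      match pvGetChild (pvChildren t) (ts.getD j ' ') with
      | none => dp                                   -- break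
      | some nd =>
        let dp' := match pvCost nd with
          | none => dp
          | some c => dp.set (j+1) (pvOmin (dp.getD (j+1) none) (di + c))
        pvInnerA ts n i di (j+1) nd dp'
    else dp
  termination_by n - j

-- outer `for i in range(n)` loop
def pvOuterA (ts : List Char) (n : Nat) (root : PvTrie)
    (i : Nat) (dp : List (Option Int)) : List (Option Int) :=
    if _h : i < n then
      let dp' := match dp.getD i none with
        | none => dp                                  -- dp[i] == inf: skip
        | some di => pvInnerA ts n i di i root dp
      pvOuterA ts n root (i+1) dp'
    else dp
  termination_by n - i

def min_cost_to_form_string (target : String) (words : List String) (costs : List Int) : Int :=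
  let root := (words.zip costs).foldl
    (fun r wc => pvInsertWord r wc.1.toList wc.2) (.node .nil none)
  let ts := target.toList
  let n := ts.length
  let dp := ((List.replicate (n+1) (none : Option Int)).set 0 (some 0))
  let dp := pvOuterA ts n root 0 dp
  match dp.getD n none with
  | some v => v
  | none => -1

-- ===== PORT B =====
-- by_len : {length : {word : cheapest cost}}; one zip pass builds it.
def pvBuckets (pairs : List (String × Int)) :
    PySem.Dict Nat (PySem.Dict String Int) :=
  pairs.foldl
    (fun d wc =>
      if wc.1 = "" then d                    -- `if not w: continue`
      else
        let L := wc.1.toList.length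
        let bucket := d.getD L PySem.Dict.empty   -- by_len.setdefault(len(w), {})
        let bucket :=
          match bucket.get? wc.1 with
          | none => bucket.insert wc.1 wc.2
          | some old => if wc.2 < old then bucket.insert wc.1 wc.2 else bucket
        d.insert L bucket)
    PySem.Dict.empty

-- inner `for L in lengths` loop: one substring lookup per distinct length,
-- break once i + L > n (lengths is sorted).
def pvInnerB (ts : List Char) (n i : Nat) (byl : PySem.Dict Nat (PySem.Dict String Int))
    (di : Int) : List Nat → List (Option Int) → List (Option Int)
  | [], dp => dp
  | L :: rest, dp =>
    if i + L > n then dp                              -- break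
    else
      let sub := String.ofList ((ts.drop i).take L)       -- target[i:i+L] (0 ≤ i ≤ i+L ≤ n: drop/take is exact)
      match (byl.getD L PySem.Dict.empty).get? sub with  -- by_len[L].get(sub); L is always a key
      | none => pvInnerB ts n i byl di rest dp
      | some c =>
        let dp' :=
          match dp.getD (i+L) none with
          | none => dp.set (i+L) (some (di + c))
          | some old => if di + c < old then dp.set (i+L) (some (di + c)) else dp
        pvInnerB ts n i byl di rest dp'

def pvOuterB (ts : List Char) (n : Nat) (byl : PySem.Dict Nat (PySem.Dict String Int))
    (lens : List Nat) (i : Nat) (dp : List (Option Int)) : List (Option Int) :=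
    if _h : i < n then
      let dp' := match dp.getD i none with
        | none => dp                                  -- dp[i] is None: continue
        | some di => pvInnerB ts n i byl di lens dp
      pvOuterB ts n byl lens (i+1) dp'
    else dp
  termination_by n - i

def min_cost_to_form_string_alt (target : String) (words : List String) (costs : List Int) : Int :=
  let byl := pvBuckets (words.zip costs)
  let lens := PySem.List.sorted byl.keys (fun x => x) false   -- sorted(by_len)
  let ts := target.toList
  let n := ts.length
  let dp := ((List.replicate (n+1) (none : Option Int)).set 0 (some 0))
  let dp := pvOuterB ts n byl lens 0 dp
  match dp.getD n none with
  | some v => v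
  | none => -1

-- ===== PRECONDITION & SPEC =====
def Spec_min_cost_to_form_string (target : String) (words : List String) (costs : List Int) (out : Int) : Prop := out = min_cost_to_form_string_alt target words costs
instance (target : String) (words : List String) (costs : List Int) (out : Int) : Decidable (Spec_min_cost_to_form_string target words costs out) := by unfold Spec_min_cost_to_form_string; infer_instance

-- ===== CLAIM (what is proved, stated in full; the proofs are below) =====
def Claim_equal_min_cost_to_form_string : Prop := ∀ (target : String) (words : List String) (costs : List Int), Dom_min_cost_to_form_string target words costs → Spec_min_cost_to_form_string target words costs (min_cost_to_form_string target words costs)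

-- ===== LEMMAS AND PROOFS =====

-- Minimal cost among pairs (word, cost) whose word spells s (none = no such word).
def pvW (pairs : List (String × Int)) (s : List Char) : Option Int :=
  pairs.foldl (fun acc wc => if wc.1.toList = s then pvOmin acc wc.2 else acc) none

def pvWalk : PvTrie → List Char → Option PvTrie
  | t, [] => some t
  | t, a :: rest =>
    match pvGetChild (pvChildren t) a with
    | none => none
    | some u => pvWalk u rest

def pvTrieCost (t : PvTrie) (s : List Char) : Option Int :=
  match pvWalk t s with
  | none => none
  | some u => pvCost u

def pvRelax (di : Int) (dp : List (Option Int)) (kc : Nat × Int) : List (Option Int) :=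
  dp.set kc.1 (pvOmin (dp.getD kc.1 none) (di + kc.2))

-- The relaxations both inner loops perform at row i, in increasing k.
def pvItems (pairs : List (String × Int)) (ts : List Char) (n i : Nat) : List (Nat × Int) :=
  (List.range' (i+1) (n-i)).filterMap
    (fun k => (pvW pairs ((ts.drop i).take (k-i))).map (fun c => (k, c)))

def pvBuild (pairs : List (String × Int)) (t0 : PvTrie) : PvTrie :=
  pairs.foldl (fun r wc => pvInsertWord r wc.1.toList wc.2) t0

theorem pvGetChild_setChild (ch : PvChildren) (a b : Char) (t : PvTrie) :
    pvGetChild (pvSetChild ch a t) b = if b = a then some t else pvGetChild ch b := by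
  match ch with
  | .nil =>
    by_cases hba : b = a
    · subst hba; simp [pvSetChild, pvGetChild]
    · simp [pvSetChild, pvGetChild, hba, Ne.symm hba]
  | .cons c u rest =>
    by_cases hca : c = a
    · subst hca
      by_cases hcb : c = b
      · subst hcb; simp [pvSetChild, pvGetChild]
      · have hbc : ¬ b = c := fun h => hcb h.symm
        simp [pvSetChild, pvGetChild, hcb, hbc]
    · simp only [pvSetChild, if_neg hca, pvGetChild]
      by_cases hcb : c = b
      · subst hcb; simp [hca]
      · simp [hcb, pvGetChild_setChild rest a b t]

theorem pvTrieCost_nil (ch : PvChildren) (co : Option Int) :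
    pvTrieCost (.node ch co) [] = co := rfl

theorem pvTrieCost_cons_none (ch : PvChildren) (co : Option Int) (a : Char) (s : List Char)
    (h : pvGetChild ch a = none) : pvTrieCost (.node ch co) (a :: s) = none := by
  simp [pvTrieCost, pvWalk, pvChildren, h]

theorem pvTrieCost_cons_some (ch : PvChildren) (co : Option Int) (a : Char) (s : List Char)
    (u : PvTrie) (h : pvGetChild ch a = some u) :
    pvTrieCost (.node ch co) (a :: s) = pvTrieCost u s := by
  simp [pvTrieCost, pvWalk, pvChildren, h]

theorem pvWalk_cons_none (ch : PvChildren) (co : Option Int) (a : Char) (s : List Char)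
    (h : pvGetChild ch a = none) : pvWalk (.node ch co) (a :: s) = none := by
  simp [pvWalk, pvChildren, h]

theorem pvWalk_cons_some (ch : PvChildren) (co : Option Int) (a : Char) (s : List Char)
    (u : PvTrie) (h : pvGetChild ch a = some u) :
    pvWalk (.node ch co) (a :: s) = pvWalk u s := by
  simp [pvWalk, pvChildren, h]

theorem pvTrieCost_empty (s : List Char) : pvTrieCost (.node .nil none) s = none := by
  cases s <;> simp [pvTrieCost, pvWalk, pvCost, pvChildren, pvGetChild]

theorem pvInsertWord_cons_some (ch : PvChildren) (co : Option Int) (a : Char)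
    (w : List Char) (c : Int) (u : PvTrie) (hg : pvGetChild ch a = some u) :
    pvInsertWord (.node ch co) (a :: w) c =
      .node (pvSetChild ch a (pvInsertWord u w c)) co := by
  simp [pvInsertWord, hg]

theorem pvInsertWord_cons_none (ch : PvChildren) (co : Option Int) (a : Char)
    (w : List Char) (c : Int) (hg : pvGetChild ch a = none) :
    pvInsertWord (.node ch co) (a :: w) c =
      .node (pvSetChild ch a (pvInsertWord (.node .nil none) w c)) co := by
  simp [pvInsertWord, hg]

theorem pvTrieCost_insert (w : List Char) (t : PvTrie) (c : Int) (s : List Char) :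
    pvTrieCost (pvInsertWord t w c) s =
      if s = w then pvOmin (pvTrieCost t w) c else pvTrieCost t s := by
  induction w generalizing t s with
  | nil =>
    obtain ⟨ch, co⟩ := t
    cases s with
    | nil => simp [pvInsertWord, pvTrieCost_nil]
    | cons b s' =>
      simp only [pvInsertWord]
      cases hg : pvGetChild ch b with
      | none => rw [pvTrieCost_cons_none _ _ _ _ hg, pvTrieCost_cons_none _ _ _ _ hg]; simp
      | some u =>
        rw [pvTrieCost_cons_some _ _ _ _ _ hg, pvTrieCost_cons_some _ _ _ _ _ hg]; simp
  | cons a w' ih =>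
    obtain ⟨ch, co⟩ := t
    have hne : ∀ s' : List Char, s' ≠ w' → (a :: s' : List Char) ≠ a :: w' := by
      intro s' h hh; exact h (List.cons.injEq .. ▸ hh).2
    cases hg : pvGetChild ch a with
    | none =>
      rw [pvInsertWord_cons_none _ _ _ _ _ hg]
      cases s with
      | nil => rw [pvTrieCost_nil, pvTrieCost_nil]; simp
      | cons b s' =>
        by_cases hba : b = a
        · subst hba
          have hg1 : pvGetChild (pvSetChild ch b (pvInsertWord (.node .nil none) w' c)) b
              = some (pvInsertWord (.node .nil none) w' c) := by
            rw [pvGetChild_setChild, if_pos rfl]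
          rw [pvTrieCost_cons_some _ _ _ _ _ hg1, ih, pvTrieCost_empty,
            pvTrieCost_cons_none _ _ _ _ hg]
          by_cases hsw : s' = w'
          · simp [hsw]
          · rw [if_neg hsw, if_neg (hne s' hsw), pvTrieCost_empty,
              pvTrieCost_cons_none _ _ _ _ hg]
        · have hg1 : pvGetChild (pvSetChild ch a (pvInsertWord (.node .nil none) w' c)) b
              = pvGetChild ch b := by rw [pvGetChild_setChild, if_neg hba]
          rw [if_neg (fun hh => hba (List.cons.injEq .. ▸ hh).1)]
          cases hgb : pvGetChild ch b with
          | none =>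
            rw [pvTrieCost_cons_none _ _ _ _ (hg1.trans hgb),
              pvTrieCost_cons_none _ _ _ _ hgb]
          | some v =>
            rw [pvTrieCost_cons_some _ _ _ _ _ (hg1.trans hgb),
              pvTrieCost_cons_some _ _ _ _ _ hgb]
    | some u =>
      rw [pvInsertWord_cons_some _ _ _ _ _ _ hg]
      cases s with
      | nil => rw [pvTrieCost_nil, pvTrieCost_nil]; simp
      | cons b s' =>
        by_cases hba : b = a
        · subst hba
          have hg1 : pvGetChild (pvSetChild ch b (pvInsertWord u w' c)) b
              = some (pvInsertWord u w' c) := by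
            rw [pvGetChild_setChild, if_pos rfl]
          rw [pvTrieCost_cons_some _ _ _ _ _ hg1, ih,
            pvTrieCost_cons_some _ co _ w' _ hg]
          by_cases hsw : s' = w'
          · simp [hsw]
          · rw [if_neg hsw, if_neg (hne s' hsw), pvTrieCost_cons_some _ co _ s' _ hg]
        · have hg1 : pvGetChild (pvSetChild ch a (pvInsertWord u w' c)) b
              = pvGetChild ch b := by rw [pvGetChild_setChild, if_neg hba]
          rw [if_neg (fun hh => hba (List.cons.injEq .. ▸ hh).1)]
          cases hgb : pvGetChild ch b with
          | none =>
            rw [pvTrieCost_cons_none _ _ _ _ (hg1.trans hgb),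
              pvTrieCost_cons_none _ _ _ _ hgb]
          | some v =>
            rw [pvTrieCost_cons_some _ _ _ _ _ (hg1.trans hgb),
              pvTrieCost_cons_some _ _ _ _ _ hgb]

theorem pvTrieCost_build (pairs : List (String × Int)) (t0 : PvTrie) (s : List Char) :
    pvTrieCost (pvBuild pairs t0) s =
      pairs.foldl (fun acc wc => if wc.1.toList = s then pvOmin acc wc.2 else acc)
        (pvTrieCost t0 s) := by
  induction pairs generalizing t0 with
  | nil => rfl
  | cons wc rest ih =>
    simp only [pvBuild, List.foldl_cons] at *
    rw [ih, pvTrieCost_insert]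
    by_cases h : wc.1.toList = s
    · simp [h]
    · rw [if_neg h, if_neg (by intro hh; exact h hh.symm)]

theorem pvTrieCost_root (pairs : List (String × Int)) (s : List Char) :
    pvTrieCost (pvBuild pairs (.node .nil none)) s = pvW pairs s := by
  rw [pvTrieCost_build, pvTrieCost_empty, pvW]

-- walk stays defined under insertion
theorem pvWalk_insert_isSome (w : List Char) (t : PvTrie) (c : Int) (s : List Char)
    (h : (pvWalk t s).isSome) : (pvWalk (pvInsertWord t w c) s).isSome := by
  induction w generalizing t s with
  | nil =>
    obtain ⟨ch, co⟩ := t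
    cases s with
    | nil => simp [pvWalk]
    | cons b s' =>
      simp only [pvInsertWord]
      cases hg : pvGetChild ch b with
      | none => rw [pvWalk_cons_none _ _ _ _ hg] at h; simp at h
      | some u => rw [pvWalk_cons_some _ _ _ _ _ hg] at h ⊢; exact h
  | cons a w' ih =>
    obtain ⟨ch, co⟩ := t
    cases s with
    | nil => simp [pvWalk]
    | cons b s' =>
      cases hgb : pvGetChild ch b with
      | none => rw [pvWalk_cons_none _ _ _ _ hgb] at h; simp at h
      | some v =>
        rw [pvWalk_cons_some _ _ _ _ _ hgb] at h
        by_cases hba : b = a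
        · subst hba
          rw [pvInsertWord_cons_some _ _ _ _ _ _ hgb]
          have hg1 : pvGetChild (pvSetChild ch b (pvInsertWord v w' c)) b
              = some (pvInsertWord v w' c) := by rw [pvGetChild_setChild, if_pos rfl]
          rw [pvWalk_cons_some _ _ _ _ _ hg1]
          exact ih v s' h
        · cases hga : pvGetChild ch a with
          | none =>
            rw [pvInsertWord_cons_none _ _ _ _ _ hga]
            have hg1 : pvGetChild (pvSetChild ch a (pvInsertWord (.node .nil none) w' c)) b
                = pvGetChild ch b := by rw [pvGetChild_setChild, if_neg hba]
            rw [pvWalk_cons_some _ _ _ _ _ (hg1.trans hgb)]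
            exact h
          | some u =>
            rw [pvInsertWord_cons_some _ _ _ _ _ _ hga]
            have hg1 : pvGetChild (pvSetChild ch a (pvInsertWord u w' c)) b
                = pvGetChild ch b := by rw [pvGetChild_setChild, if_neg hba]
            rw [pvWalk_cons_some _ _ _ _ _ (hg1.trans hgb)]
            exact h

-- after inserting w, every prefix of w is walkable
theorem pvWalk_insert_prefix (w : List Char) (t : PvTrie) (c : Int) (s : List Char)
    (h : s <+: w) : (pvWalk (pvInsertWord t w c) s).isSome := by
  induction w generalizing t s with
  | nil =>
    rw [List.prefix_nil] at h; subst h; simp [pvWalk]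
  | cons a w' ih =>
    obtain ⟨ch, co⟩ := t
    cases s with
    | nil => simp [pvWalk]
    | cons b s' =>
      obtain ⟨hb, hs⟩ := List.cons_prefix_cons.mp h
      subst hb
      cases hg : pvGetChild ch b with
      | none =>
        rw [pvInsertWord_cons_none _ _ _ _ _ hg]
        have hg1 : pvGetChild (pvSetChild ch b (pvInsertWord (.node .nil none) w' c)) b
            = some (pvInsertWord (.node .nil none) w' c) := by
          rw [pvGetChild_setChild, if_pos rfl]
        rw [pvWalk_cons_some _ _ _ _ _ hg1]
        exact ih _ s' hs
      | some u =>
        rw [pvInsertWord_cons_some _ _ _ _ _ _ hg]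
        have hg1 : pvGetChild (pvSetChild ch b (pvInsertWord u w' c)) b
            = some (pvInsertWord u w' c) := by rw [pvGetChild_setChild, if_pos rfl]
        rw [pvWalk_cons_some _ _ _ _ _ hg1]
        exact ih _ s' hs

theorem pvWalk_build_isSome (pairs : List (String × Int)) (t0 : PvTrie) (s : List Char)
    (h : (pvWalk t0 s).isSome) : (pvWalk (pvBuild pairs t0) s).isSome := by
  induction pairs generalizing t0 with
  | nil => exact h
  | cons hd rest ih =>
    simp only [pvBuild, List.foldl_cons] at *
    exact ih _ (pvWalk_insert_isSome _ _ _ _ h)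

theorem pvWalk_build_prefix (pairs : List (String × Int)) (t0 : PvTrie)
    (wc : String × Int) (hm : wc ∈ pairs) (s : List Char) (hp : s <+: wc.1.toList) :
    (pvWalk (pvBuild pairs t0) s).isSome := by
  induction pairs generalizing t0 with
  | nil => cases hm
  | cons hd rest ih =>
    simp only [pvBuild, List.foldl_cons]
    rcases List.mem_cons.mp hm with h | h
    · subst h
      exact pvWalk_build_isSome rest _ s (pvWalk_insert_prefix _ _ _ _ hp)
    · exact ih _ h

theorem pvW_ne_none (pairs : List (String × Int)) (s : List Char)
    (h : pvW pairs s ≠ none) : ∃ wc ∈ pairs, wc.1.toList = s := by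
  rw [pvW] at h
  suffices haux : ∀ (acc : Option Int),
      pairs.foldl (fun acc wc => if wc.1.toList = s then pvOmin acc wc.2 else acc) acc ≠ none →
      acc ≠ none ∨ ∃ wc ∈ pairs, wc.1.toList = s by
    rcases haux none h with h' | h'
    · exact absurd rfl h'
    · exact h'
  clear h
  induction pairs with
  | nil => intro acc h'; exact Or.inl h'
  | cons hd rest ih =>
    intro acc h'
    simp only [List.foldl_cons] at h'
    rcases ih _ h' with h'' | h''
    · by_cases hh : hd.1.toList = s
      · exact Or.inr ⟨hd, List.mem_cons_self, hh⟩
      · rw [if_neg hh] at h''; exact Or.inl h''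
    · obtain ⟨wc, hw1, hw2⟩ := h''
      exact Or.inr ⟨wc, List.mem_cons_of_mem _ hw1, hw2⟩

-- if some word spells an extension of s (as witnessed by pvW), s is walkable in the trie
theorem pvWalk_root_of_W (pairs : List (String × Int)) (s s' : List Char)
    (hp : s <+: s') (h : pvW pairs s' ≠ none) :
    (pvWalk (pvBuild pairs (.node .nil none)) s).isSome := by
  obtain ⟨wc, hm, hw⟩ := pvW_ne_none pairs s' h
  exact pvWalk_build_prefix pairs _ wc hm s (hw ▸ hp)

theorem pvWalk_append (t : PvTrie) (p q : List Char) :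
    pvWalk t (p ++ q) = (pvWalk t p).bind (fun u => pvWalk u q) := by
  induction p generalizing t with
  | nil => simp [pvWalk]
  | cons b p' ih =>
    obtain ⟨ch, co⟩ := t
    cases hg : pvGetChild ch b with
    | none =>
      rw [List.cons_append, pvWalk_cons_none _ _ _ _ hg, pvWalk_cons_none _ _ _ _ hg]
      rfl
    | some u =>
      rw [List.cons_append, pvWalk_cons_some _ _ _ _ _ hg, pvWalk_cons_some _ _ _ _ _ hg, ih]

theorem pvSub_succ (ts : List Char) (i j : Nat) (hij : i ≤ j) (hj : j < ts.length) :
    (ts.drop i).take (j+1-i) = (ts.drop i).take (j-i) ++ [ts.getD j ' '] := by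
  have h1 : j + 1 - i = (j - i) + 1 := by omega
  rw [h1, List.take_add_one]
  congr 1
  have h2 : (ts.drop i)[j-i]? = ts[j]? := by
    rw [List.getElem?_drop]
    congr 1
    omega
  rw [h2, List.getElem?_eq_getElem hj]
  simp [List.getD_eq_getElem?_getD, List.getElem?_eq_getElem hj]

theorem pvSub_prefix (ts : List Char) (i m m' : Nat) (h : m ≤ m') :
    (ts.drop i).take m <+: (ts.drop i).take m' := by
  have : (ts.drop i).take m = ((ts.drop i).take m').take m := by
    rw [List.take_take, Nat.min_eq_left h]
  rw [this]
  exact List.take_prefix _ _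

theorem pvInnerA_eq (pairs : List (String × Int)) (ts : List Char) (i : Nat) (di : Int) :
    ∀ (fuel j : Nat) (t : PvTrie) (dp : List (Option Int)), fuel = ts.length - j → i ≤ j →
    pvWalk (pvBuild pairs (.node .nil none)) ((ts.drop i).take (j-i)) = some t →
    pvInnerA ts ts.length i di j t dp =
      ((List.range' (j+1) (ts.length - j)).filterMap
        (fun k => (pvW pairs ((ts.drop i).take (k-i))).map (fun c => (k, c)))).foldl
        (pvRelax di) dp := by
  intro fuel
  induction fuel with
  | zero =>
    intro j t dp hf hij _hw
    have hj : ¬ j < ts.length := by omega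
    rw [pvInnerA.eq_def, dif_neg hj]
    have : ts.length - j = 0 := by omega
    rw [this]
    rfl
  | succ fuel ih =>
    intro j t dp hf hij hw
    have hj : j < ts.length := by omega
    set n := ts.length with hn
    have hsub : (ts.drop i).take (j+1-i) = (ts.drop i).take (j-i) ++ [ts.getD j ' '] :=
      pvSub_succ ts i j hij hj
    rw [pvInnerA.eq_def, dif_pos hj]
    cases hgc : pvGetChild (pvChildren t) (ts.getD j ' ') with
    | none =>
      -- break: no word spells any longer substring starting at i
      have hnone : ∀ k ∈ List.range' (j+1) (n - j),
          pvW pairs ((ts.drop i).take (k-i)) = none := by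
        intro k hk
        rw [List.mem_range'] at hk
        obtain ⟨hk1, _hk2⟩ := hk
        by_contra hW
        have hpre : (ts.drop i).take (j+1-i) <+: (ts.drop i).take (k-i) :=
          pvSub_prefix ts i _ _ (by omega)
        have hws := pvWalk_root_of_W pairs _ _ hpre hW
        rw [hsub, pvWalk_append, hw, Option.bind_some] at hws
        obtain ⟨ch, co⟩ := t
        simp only [pvChildren] at hgc
        rw [pvWalk_cons_none _ _ _ _ hgc] at hws
        simp at hws
      have hfm : (List.range' (j+1) (n - j)).filterMap
          (fun k => (pvW pairs ((ts.drop i).take (k-i))).map (fun c => (k, c))) = [] := by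
        rw [List.filterMap_eq_nil_iff]
        intro k hk
        rw [hnone k hk]
        rfl
      rw [hfm]
      rfl
    | some nd =>
      have hwalk' : pvWalk (pvBuild pairs (.node .nil none)) ((ts.drop i).take (j+1-i))
          = some nd := by
        rw [hsub, pvWalk_append, hw, Option.bind_some]
        obtain ⟨ch, co⟩ := t
        simp only [pvChildren] at hgc
        rw [pvWalk_cons_some _ _ _ _ _ hgc]
        rfl
      have hcost : pvCost nd = pvW pairs ((ts.drop i).take (j+1-i)) := by
        have := pvTrieCost_root pairs ((ts.drop i).take (j+1-i))
        rw [pvTrieCost, hwalk'] at this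
        exact this
      have hrange : List.range' (j+1) (n - j) = (j+1) :: List.range' (j+2) (n - (j+1)) := by
        have h1 : n - j = (n - (j+1)) + 1 := by omega
        rw [h1, List.range'_succ]
      rw [hrange, List.filterMap_cons]
      cases hWv : pvW pairs ((ts.drop i).take (j+1-i)) with
      | none =>
        have hCv : pvCost nd = none := by rw [hcost, hWv]
        simp only [hCv, Option.map_none]
        exact ih (j+1) nd dp (by omega) (by omega) hwalk'
      | some cc =>
        have hCv : pvCost nd = some cc := by rw [hcost, hWv]
        simp only [hCv, Option.map_some, List.foldl_cons]
        exact ih (j+1) nd _ (by omega) (by omega) hwalk'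

-- ---- bucket layer (port B's by_len dict) ----

-- lookup of the (nonempty) string s through the length buckets
def pvLookupB (d : PySem.Dict Nat (PySem.Dict String Int)) (s : List Char) : Option Int :=
  (d.getD s.length PySem.Dict.empty).get? (String.ofList s)

def pvBStep (d : PySem.Dict Nat (PySem.Dict String Int)) (wc : String × Int) :
    PySem.Dict Nat (PySem.Dict String Int) :=
  if wc.1 = "" then d
  else
    let L := wc.1.toList.length
    let bucket := d.getD L PySem.Dict.empty
    let bucket :=
      match bucket.get? wc.1 with
      | none => bucket.insert wc.1 wc.2
      | some old => if wc.2 < old then bucket.insert wc.1 wc.2 else bucket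
    d.insert L bucket

theorem pvBuckets_eq (pairs : List (String × Int)) :
    pvBuckets pairs = pairs.foldl pvBStep PySem.Dict.empty := rfl

theorem pvLookupB_step (d : PySem.Dict Nat (PySem.Dict String Int)) (wc : String × Int)
    (s : List Char) (hs : s ≠ []) :
    pvLookupB (pvBStep d wc) s =
      if wc.1.toList = s then pvOmin (pvLookupB d s) wc.2 else pvLookupB d s := by
  by_cases hw0 : wc.1 = ""
  · have hne : wc.1.toList ≠ s := by
      rw [hw0]; intro h; apply hs; simpa using h.symm
    rw [pvBStep, if_pos hw0, if_neg hne]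
  · rw [pvBStep, if_neg hw0]
    simp only []
    by_cases hL : s.length = wc.1.toList.length
    · rw [pvLookupB, PySem.Dict.getD_insert, if_pos hL]
      rw [show pvLookupB d s = (d.getD wc.1.toList.length PySem.Dict.empty).get?
            (String.ofList s) by rw [pvLookupB, hL]]
      by_cases hws : wc.1.toList = s
      · have hmk : String.ofList s = wc.1 := by rw [← hws]; simp
        rw [if_pos hws, hmk]
        split
        next heq =>
          rw [PySem.Dict.get?_insert_self, heq]
          rfl
        next old heq =>
          rw [heq]
          have hred : pvOmin (some old) wc.2 = some (min old wc.2) := rfl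
          by_cases hlt : wc.2 < old
          · rw [if_pos hlt, PySem.Dict.get?_insert_self, hred]
            congr 1
            omega
          · rw [if_neg hlt, heq, hred]
            congr 1
            omega
      · have hmk : String.ofList s ≠ wc.1 := by
          intro h; exact hws (by rw [← h]; simp)
        rw [if_neg hws]
        split
        next heq => rw [PySem.Dict.get?_insert_of_ne _ _ hmk]
        next old heq =>
          by_cases hlt : wc.2 < old
          · rw [if_pos hlt, PySem.Dict.get?_insert_of_ne _ _ hmk]
          · rw [if_neg hlt]
    · have hws : wc.1.toList ≠ s := fun h => hL (by rw [h])
      rw [if_neg hws, pvLookupB, pvLookupB, PySem.Dict.getD_insert, if_neg hL]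

theorem pvLookupB_buckets (pairs : List (String × Int)) (s : List Char) (hs : s ≠ []) :
    pvLookupB (pvBuckets pairs) s = pvW pairs s := by
  rw [pvBuckets_eq, pvW]
  suffices haux : ∀ d, pvLookupB (pairs.foldl pvBStep d) s =
      pairs.foldl (fun acc wc => if wc.1.toList = s then pvOmin acc wc.2 else acc)
        (pvLookupB d s) by
    have h0 : pvLookupB PySem.Dict.empty s = none := by
      rw [pvLookupB]
      simp [PySem.Dict.getD_empty, PySem.Dict.get?_empty]
    rw [haux PySem.Dict.empty, h0]
  induction pairs with
  | nil => intro d; rfl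
  | cons wc rest ih =>
    intro d
    simp only [List.foldl_cons]
    rw [ih, pvLookupB_step d wc s hs]

-- keys of the buckets: unique, all ≥ 1, and cover every word pvW accepts
theorem pvBuckets_keys (pairs : List (String × Int)) :
    (pvBuckets pairs).keys.Nodup ∧ ∀ L ∈ (pvBuckets pairs).keys, 1 ≤ L := by
  rw [pvBuckets_eq]
  suffices haux : ∀ d : PySem.Dict Nat (PySem.Dict String Int),
      d.keys.Nodup → (∀ L ∈ d.keys, 1 ≤ L) →
      (pairs.foldl pvBStep d).keys.Nodup ∧ ∀ L ∈ (pairs.foldl pvBStep d).keys, 1 ≤ L by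
    exact haux PySem.Dict.empty (by simp [PySem.Dict.keys_empty]) (by simp [PySem.Dict.keys_empty])
  induction pairs with
  | nil => intro d h1 h2; exact ⟨h1, h2⟩
  | cons wc rest ih =>
    intro d h1 h2
    simp only [List.foldl_cons]
    apply ih
    · rw [pvBStep]
      by_cases hw0 : wc.1 = ""
      · rw [if_pos hw0]; exact h1
      · rw [if_neg hw0]
        simp only []
        cases hc : PySem.Dict.contains d wc.1.toList.length with
        | true =>
          rw [PySem.Dict.keys_insert_of_contains _ _ hc]
          exact h1
        | false =>
          rw [PySem.Dict.keys_insert_of_not_contains _ _ hc]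
          have hnotin : wc.1.toList.length ∉ d.keys := fun hmem =>
            absurd ((PySem.Dict.contains_iff_mem_keys _ _).mpr hmem) (by rw [hc]; simp)
          rw [List.nodup_append]
          refine ⟨h1, List.nodup_singleton _, ?_⟩
          intro a ha b hbm
          simp only [List.mem_singleton] at hbm
          subst hbm
          intro heq
          exact hnotin (heq ▸ ha)
    · rw [pvBStep]
      by_cases hw0 : wc.1 = ""
      · rw [if_pos hw0]; exact h2
      · rw [if_neg hw0]
        simp only []
        cases hc : PySem.Dict.contains d wc.1.toList.length with
        | true =>
          rw [PySem.Dict.keys_insert_of_contains _ _ hc]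
          exact h2
        | false =>
          rw [PySem.Dict.keys_insert_of_not_contains _ _ hc]
          intro L hL
          rcases List.mem_append.mp hL with h | h
          · exact h2 L h
          · rw [List.mem_singleton] at h
            subst h
            have : wc.1.toList ≠ [] := fun h => hw0 (by
              have := congrArg String.ofList h
              simpa using this)
            have : wc.1.toList.length ≠ 0 := fun h => this (List.length_eq_zero_iff.mp h)
            omega

theorem pvBuckets_covers (pairs : List (String × Int)) (s : List Char) (hs : s ≠ [])
    (h : pvW pairs s ≠ none) : s.length ∈ (pvBuckets pairs).keys := by
  by_contra hmem
  have hc : (pvBuckets pairs).contains s.length = false := by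
    cases hcc : (pvBuckets pairs).contains s.length with
    | false => rfl
    | true => exact absurd ((PySem.Dict.contains_iff_mem_keys _ _).mp hcc) hmem
  have : pvLookupB (pvBuckets pairs) s = none := by
    rw [pvLookupB, PySem.Dict.getD_of_not_contains _ _ hc, PySem.Dict.get?_empty]
  rw [pvLookupB_buckets pairs s hs] at this
  exact h this

-- ---- sorted-length traversal = increasing-k traversal ----

theorem pvSet_getElem? (l : List (Option Int)) (n : Nat) (a : Option Int)
    (h : l[n]? = some a) : l.set n a = l := by
  have hn : n < l.length := by
    by_contra hc
    rw [List.getElem?_eq_none_iff.mpr (by omega)] at h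
    cases h
  apply List.ext_getElem?
  intro m
  by_cases hm : m = n
  · subst hm
    rw [List.getElem?_set_self (by omega), h]
  · rw [List.getElem?_set_ne (by omega)]

theorem pvRange'_split (a m L : Nat) (h1 : a ≤ L) (h2 : L < a + m) :
    List.range' a m = List.range' a (L - a) ++ List.range' L (m - (L - a)) := by
  have h : List.range' a (L - a) ++ List.range' (a + 1 * (L - a)) (m - (L - a))
      = List.range' a ((L - a) + (m - (L - a))) := List.range'_append
  rw [show a + 1 * (L - a) = L by omega] at h
  rw [show (L - a) + (m - (L - a)) = m by omega] at h
  exact h.symm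

-- a filterMap over consecutive k may be computed over any strictly sorted list
-- containing the support of g
theorem pvCore {α : Type} (g : Nat → Option α) :
    ∀ (ls : List Nat) (a m : Nat), ls.Pairwise (· < ·) → (∀ L ∈ ls, a ≤ L) →
    (∀ k, a ≤ k → k < a + m → g k ≠ none → k ∈ ls) →
    (List.range' a m).filterMap g = ls.filterMap (fun L => if L < a + m then g L else none) := by
  intro ls
  induction ls with
  | nil =>
    intro a m _ _ hcomp
    rw [List.filterMap_nil, List.filterMap_eq_nil_iff]
    intro k hk
    rw [List.mem_range'] at hk
    obtain ⟨j, hj1, hj2⟩ := hk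
    by_contra hg
    exact absurd (hcomp k (by omega) (by omega) hg) (List.not_mem_nil)
  | cons L rest ih =>
    intro a m hpw hbnd hcomp
    have hrest_gt : ∀ L' ∈ rest, L < L' := (List.pairwise_cons.mp hpw).1
    have hpw' : rest.Pairwise (· < ·) := (List.pairwise_cons.mp hpw).2
    by_cases hLm : L < a + m
    · have haL : a ≤ L := hbnd L List.mem_cons_self
      rw [pvRange'_split a m L haL hLm, List.filterMap_append]
      have hfst : (List.range' a (L - a)).filterMap g = [] := by
        rw [List.filterMap_eq_nil_iff]
        intro k hk
        rw [List.mem_range'] at hk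
        obtain ⟨j, hj1, hj2⟩ := hk
        by_contra hg
        rcases List.mem_cons.mp (hcomp k (by omega) (by omega) hg) with h | h
        · omega
        · exact absurd (hrest_gt k h) (by omega)
      rw [hfst, List.nil_append]
      have hm1 : m - (L - a) = (m - (L - a) - 1) + 1 := by omega
      rw [hm1]
      have hrs : List.range' L ((m - (L - a) - 1) + 1) = L :: List.range' (L + 1) (m - (L - a) - 1) :=
        List.range'_succ
      rw [hrs, List.filterMap_cons, List.filterMap_cons]
      have hih := ih (L+1) (m - (L - a) - 1) hpw'
        (fun L' hL' => by have := hrest_gt L' hL'; omega)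
        (fun k hk1 hk2 hg => by
          rcases List.mem_cons.mp (hcomp k (by omega) (by omega) hg) with h | h
          · omega
          · exact h)
      have hsum : L + 1 + (m - (L - a) - 1) = a + m := by omega
      rw [hsum] at hih
      rw [if_pos hLm]
      cases hgL : g L with
      | none => rw [hih]
      | some v => rw [hih]
    · -- every length from here on exceeds the window: both sides are empty
      have hrhs : (L :: rest).filterMap (fun L' => if L' < a + m then g L' else none) = [] := by
        rw [List.filterMap_eq_nil_iff]
        intro L' hL'
        rcases List.mem_cons.mp hL' with h | h
        · subst h; rw [if_neg hLm]
        · rw [if_neg (by have := hrest_gt L' h; omega)]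
      rw [hrhs, List.filterMap_eq_nil_iff]
      intro k hk
      rw [List.mem_range'] at hk
      obtain ⟨j, hj1, hj2⟩ := hk
      by_contra hg
      rcases List.mem_cons.mp (hcomp k (by omega) (by omega) hg) with h | h
      · omega
      · exact absurd (hrest_gt k h) (by omega)

theorem pvInnerB_eq (pairs : List (String × Int)) (ts : List Char) (i : Nat) (di : Int)
    (hi : i ≤ ts.length) :
    ∀ (ls : List Nat) (dp : List (Option Int)), ls.Pairwise (· < ·) → (∀ L ∈ ls, 1 ≤ L) →
    pvInnerB ts ts.length i (pvBuckets pairs) di ls dp =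
      (ls.filterMap (fun L => if i + L ≤ ts.length then
          (pvW pairs ((ts.drop i).take L)).map (fun c => (i+L, c)) else none)).foldl
        (pvRelax di) dp := by
  intro ls
  induction ls with
  | nil => intro dp _ _; rfl
  | cons L rest ih =>
    intro dp hpw hbnd
    have hrest_gt : ∀ L' ∈ rest, L < L' := (List.pairwise_cons.mp hpw).1
    have hpw' : rest.Pairwise (· < ·) := (List.pairwise_cons.mp hpw).2
    have hbnd' : ∀ L' ∈ rest, 1 ≤ L' := fun L' h => hbnd L' (List.mem_cons_of_mem _ h)
    by_cases hbr : i + L > ts.length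
    · rw [pvInnerB, if_pos hbr]
      have hfm : (L :: rest).filterMap (fun L' => if i + L' ≤ ts.length then
          (pvW pairs ((ts.drop i).take L')).map (fun c => (i+L', c)) else none) = [] := by
        rw [List.filterMap_eq_nil_iff]
        intro L' hL'
        rcases List.mem_cons.mp hL' with h | h
        · subst h; rw [if_neg (by omega)]
        · rw [if_neg (by have := hrest_gt L' h; omega)]
      rw [hfm]
      rfl
    · have hiL : i + L ≤ ts.length := by omega
      have hlen : ((ts.drop i).take L).length = L := by
        simp [List.length_take, List.length_drop]
        omega
      have hsne : (ts.drop i).take L ≠ [] := by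
        intro h
        rw [h] at hlen
        have h1 : 1 ≤ L := hbnd L List.mem_cons_self
        simp at hlen
        omega
      have hlkp : ((pvBuckets pairs).getD L PySem.Dict.empty).get?
          (String.ofList ((ts.drop i).take L)) = pvW pairs ((ts.drop i).take L) := by
        have := pvLookupB_buckets pairs ((ts.drop i).take L) hsne
        rw [pvLookupB, hlen] at this
        exact this
      rw [pvInnerB, if_neg hbr]
      simp only [hlkp, List.filterMap_cons, if_pos hiL]
      cases hWv : pvW pairs ((ts.drop i).take L) with
      | none =>
        simp only [Option.map_none]
        exact ih dp hpw' hbnd'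
      | some c =>
        simp only [Option.map_some, List.foldl_cons]
        have hdp' : (match dp.getD (i+L) none with
            | none => dp.set (i+L) (some (di + c))
            | some old => if di + c < old then dp.set (i+L) (some (di + c)) else dp)
            = pvRelax di dp (i+L, c) := by
          cases hg : dp.getD (i+L) none with
          | none =>
            have h1 : (match (none : Option Int) with
                | none => dp.set (i+L) (some (di + c))
                | some old => if di + c < old then dp.set (i+L) (some (di + c)) else dp)
                = dp.set (i+L) (some (di + c)) := rfl
            rw [h1, pvRelax]
            simp only [hg]
            rfl
          | some old =>
            rw [pvRelax]
            simp only [hg]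
            by_cases hlt : di + c < old
            · rw [if_pos hlt]
              have : pvOmin (some old) (di + c) = some (di + c) := by
                rw [pvOmin]; simp only [Option.some.injEq]; omega
              rw [this]
            · rw [if_neg hlt]
              have hval : pvOmin (some old) (di + c) = some old := by
                rw [pvOmin]; simp only [Option.some.injEq]; omega
              rw [hval]
              have hget : dp[i+L]? = some (some old) := by
                rw [List.getD_eq_getElem?_getD] at hg
                cases hx : dp[i+L]? with
                | none => rw [hx] at hg; cases hg
                | some o => rw [hx] at hg; simp at hg; rw [hg]
              exact (pvSet_getElem? dp (i+L) (some old) hget).symm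
        rw [hdp']
        exact ih _ hpw' hbnd'

-- the sorted distinct length list visits exactly the ks of pvItems
theorem pvItemsB_eq (pairs : List (String × Int)) (ts : List Char) (i : Nat)
    (hi : i ≤ ts.length) :
    (PySem.List.sorted (pvBuckets pairs).keys (fun x => x) false).filterMap
        (fun L => if i + L ≤ ts.length then
          (pvW pairs ((ts.drop i).take L)).map (fun c => (i+L, c)) else none)
      = pvItems pairs ts ts.length i := by
  set lens := PySem.List.sorted (pvBuckets pairs).keys (fun x => x) false with hlens
  obtain ⟨hknd, hkbnd⟩ := pvBuckets_keys pairs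
  have hnd : lens.Nodup := (PySem.List.sorted_perm _ _ _).nodup_iff.mpr hknd
  have hle : lens.Pairwise (fun a b => a ≤ b) := PySem.List.sorted_pairwise _ _
  have hpw : lens.Pairwise (· < ·) := (hle.and hnd).imp (fun h => lt_of_le_of_ne h.1 h.2)
  have hbnd : ∀ L ∈ lens, 1 ≤ L := fun L h =>
    hkbnd L ((PySem.List.mem_sorted _ _ _ _).mp h)
  have hcore := pvCore (fun k => (pvW pairs ((ts.drop i).take (k-i))).map (fun c => (k, c)))
    (lens.map (fun L => i + L)) (i+1) (ts.length - i)
    (hpw.map _ (fun {a b} h => by omega))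
    (fun k hk => by
      obtain ⟨L, hL1, hL2⟩ := List.mem_map.mp hk
      have := hbnd L hL1
      omega)
    (fun k hk1 hk2 hg => by
      have hWk : pvW pairs ((ts.drop i).take (k-i)) ≠ none := by
        intro h
        simp only [h, Option.map_none] at hg
        exact hg rfl
      have hklen : ((ts.drop i).take (k-i)).length = k - i := by
        simp [List.length_take, List.length_drop]
        omega
      have hkne : (ts.drop i).take (k-i) ≠ [] := by
        intro h
        rw [h] at hklen
        simp at hklen
        omega
      have hmemk := pvBuckets_covers pairs _ hkne hWk
      rw [hklen] at hmemk
      rw [List.mem_map]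
      refine ⟨k - i, (PySem.List.mem_sorted _ _ _ _).mpr hmemk, by omega⟩)
  rw [List.filterMap_map] at hcore
  rw [pvItems, hcore]
  apply List.filterMap_congr
  intro L hL
  simp only [Function.comp]
  have harith : (i + L < i + 1 + (ts.length - i)) ↔ (i + L ≤ ts.length) := by omega
  by_cases hc : i + L ≤ ts.length
  · rw [if_pos (harith.mpr hc), if_pos hc]
    rw [show i + L - i = L by omega]
  · rw [if_neg (fun h => hc (harith.mp h)), if_neg hc]

-- both outer dp loops agree
theorem pvOuter_eq (pairs : List (String × Int)) (ts : List Char) :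
    ∀ (fuel i : Nat) (dp : List (Option Int)), fuel = ts.length - i →
    pvOuterA ts ts.length (pvBuild pairs (.node .nil none)) i dp =
      pvOuterB ts ts.length (pvBuckets pairs)
        (PySem.List.sorted (pvBuckets pairs).keys (fun x => x) false) i dp := by
  intro fuel
  induction fuel with
  | zero =>
    intro i dp hf
    have hi : ¬ i < ts.length := by omega
    rw [pvOuterA.eq_def, dif_neg hi, pvOuterB.eq_def, dif_neg hi]
  | succ fuel ih =>
    intro i dp hf
    have hi : i < ts.length := by omega
    rw [pvOuterA.eq_def, dif_pos hi, pvOuterB.eq_def, dif_pos hi]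
    cases hg : dp.getD i none with
    | none =>
      simp only []
      exact ih (i+1) dp (by omega)
    | some di =>
      simp only []
      obtain ⟨hknd, hkbnd⟩ := pvBuckets_keys pairs
      have hnd : (PySem.List.sorted (pvBuckets pairs).keys (fun x => x) false).Nodup :=
        (PySem.List.sorted_perm _ _ _).nodup_iff.mpr hknd
      have hle := PySem.List.sorted_pairwise (pvBuckets pairs).keys (fun x : Nat => x)
      have hA := pvInnerA_eq pairs ts i di (ts.length - i) i (pvBuild pairs (.node .nil none))
        dp rfl (le_refl i) (by rw [Nat.sub_self, List.take_zero]; rfl)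
      have hB := pvInnerB_eq pairs ts i di (by omega)
        (PySem.List.sorted (pvBuckets pairs).keys (fun x => x) false) dp
        ((hle.and hnd).imp (fun h => lt_of_le_of_ne h.1 h.2))
        (fun L h => hkbnd L ((PySem.List.mem_sorted _ _ _ _).mp h))
      rw [hA, hB, pvItemsB_eq pairs ts i (by omega)]
      rw [pvItems]
      exact ih (i+1) _ (by omega)

-- ===== VERDICT (by name: the statement is the Claim_ definition above) =====
theorem min_cost_to_form_string_spec : Claim_equal_min_cost_to_form_string := by
  intro target words costs _
  rw [Spec_min_cost_to_form_string, min_cost_to_form_string, min_cost_to_form_string_alt]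
  rw [show (words.zip costs).foldl (fun r wc => pvInsertWord r wc.1.toList wc.2)
        (PvTrie.node PvChildren.nil none)
      = pvBuild (words.zip costs) (PvTrie.node PvChildren.nil none) from rfl]
  rw [pvOuter_eq (words.zip costs) target.toList (target.toList.length - 0) 0 _ rfl]
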